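-- pv_equiv track=rewrite | github.com/ImtiazKhanDS/dsa | miscellaneous/largest_palindrome.py | largest_palindromic_number
-- ===== SOURCE A (Python) =====
-- def largest_palindromic_number(S):
--     # Step 1: Count occurrences of each digit
--     digit_counts = [0] * 10
--     for digit in S:
--         digit_counts[int(digit)] += 1
--
--     # Step 2: Construct the largest palindromic number
--     largest_palindrome = ""
--     for i in range(9, -1, -1):  # Start from 9 and move downwards
--         largest_palindrome += str(i) * digit_counts[i]
--
--     # Step 3: Ensure no leading zeros
--     largest_palindrome = largest_palindrome.lstrip("0")
--
--     # Step 4: Return the largest palindromic number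
--     return largest_palindrome if largest_palindrome else "0"
-- ===== SOURCE B (Python) =====
-- def largest_palindromic_number(S):
--     # Validate/convert each character with int() (non-digits raise ValueError, as in A),
--     # then comparison-sort the digits in descending order instead of bucket counting.
--     digits = sorted((int(c) for c in S), reverse=True)
--     result = ''.join(map(str, digits)).lstrip('0')
--     return result if result else '0'
-- ===== Notes on version B (the rewrite author's own statement) =====
-- stated objective: idiomatic
-- what changed: Replaces A's counting-sort (size-10 bucket array filled in one pass, then emitted 9 down to 0) by converting each character with int() and comparison-sorting the digit list in descending order before joining.
import Mathlib
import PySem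

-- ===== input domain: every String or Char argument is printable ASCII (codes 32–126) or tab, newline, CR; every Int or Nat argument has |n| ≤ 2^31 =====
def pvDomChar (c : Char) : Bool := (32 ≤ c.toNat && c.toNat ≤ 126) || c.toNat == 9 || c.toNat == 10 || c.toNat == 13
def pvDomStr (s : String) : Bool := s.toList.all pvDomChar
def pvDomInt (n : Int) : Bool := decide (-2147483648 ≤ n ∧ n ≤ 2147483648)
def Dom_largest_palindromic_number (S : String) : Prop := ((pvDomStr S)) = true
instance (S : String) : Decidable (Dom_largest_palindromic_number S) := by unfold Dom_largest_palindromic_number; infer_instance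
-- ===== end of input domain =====

-- B replaces A's bucket counting (size-10 count array emitted 9→0) by converting each character
-- with int() and comparison-sorting the digits in descending order; objective: idiomatic.

-- ===== PORT A =====
-- one iteration of A's counting loop: digit_counts[int(digit)] += 1 (none = ValueError from int)
def pvCountStep (acc : Option (List Int)) (digit : Char) : Option (List Int) :=
  acc.bind fun digit_counts =>
    (PySem.Int.ofStr? digit.toString).map fun d =>
      PySem.List.pySetD digit_counts d (PySem.List.pyGetD digit_counts d 0 + 1)

def largest_palindromic_number (S : String) : String :=
  match S.toList.foldl pvCountStep (some (List.replicate 10 (0 : Int))) with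
  | none => ""   -- int(digit) raised ValueError; such inputs are excluded by Pre_
  | some digit_counts =>
    let lp : List Char := (PySem.List.pyRange 9 (-1) (-1)).foldl
      (fun acc i => acc ++ (List.replicate (PySem.List.pyGetD digit_counts i 0).toNat
        (PySem.Int.toStr i).toList).flatten) []
    -- .lstrip("0") with the single-char strip set "0": drop leading '0's (exact here)
    let stripped := lp.dropWhile (fun ch => ch == '0')
    if stripped.isEmpty then "0" else String.ofList stripped

-- ===== PORT B =====
-- the generator (int(c) for c in S), consumed left to right (none = ValueError from int)
def pvIntList? : List Char → Option (List Int)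
  | [] => some []
  | c :: rest => (PySem.Int.ofStr? c.toString).bind fun d => (pvIntList? rest).map (d :: ·)

def largest_palindromic_number_alt (S : String) : String :=
  match pvIntList? S.toList with
  | none => ""   -- int(c) raised ValueError; such inputs are excluded by Pre_
  | some digits =>
    let sortedDigits := PySem.List.sorted digits (fun x => x) true
    let joined := sortedDigits.flatMap (fun d => (PySem.Int.toStr d).toList)
    -- .lstrip('0') with the single-char strip set: drop leading '0's (exact here)
    let result := joined.dropWhile (fun ch => ch == '0')
    if result.isEmpty then "0" else String.ofList result

-- ===== PRECONDITION & SPEC =====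
-- Pre_ excludes exactly the strings containing a non-digit character, on which A's int(digit)
-- raises ValueError (B raises the same way there).
def Pre_largest_palindromic_number (S : String) : Prop := S.toList.all Char.isDigit = true
instance (S : String) : Decidable (Pre_largest_palindromic_number S) := by unfold Pre_largest_palindromic_number; infer_instance
def pvWitness_largest_palindromic_number : String := "520"

def Spec_largest_palindromic_number (S : String) (out : String) : Prop := out = largest_palindromic_number_alt S
instance (S : String) (out : String) : Decidable (Spec_largest_palindromic_number S out) := by unfold Spec_largest_palindromic_number; infer_instance

-- ===== CLAIM (what is proved, stated in full; the proofs are below) =====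
def Claim_equal_largest_palindromic_number : Prop := ∀ (S : String), Dom_largest_palindromic_number S → Pre_largest_palindromic_number S → Spec_largest_palindromic_number S (largest_palindromic_number S)

-- ===== LEMMAS AND PROOFS =====

-- the digit character for bucket k (proof-side only)
def pvDC (k : Nat) : Char := ['0','1','2','3','4','5','6','7','8','9'].getD k '0'

-- the integer value of a digit character (proof-side only)
def pvVal (c : Char) : Int := (c.toNat : Int) - 48

-- the canonical descending digit list: (n 9) nines, then (n 8) eights, …, then (n 0) zeros
def pvEmit (n : Nat → Nat) : Nat → List Int
  | 0 => []
  | m + 1 => List.replicate (n m) ((m : Nat) : Int) ++ pvEmit n m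

-- the same, as characters
def pvEmitC (n : Nat → Nat) : Nat → List Char
  | 0 => []
  | m + 1 => List.replicate (n m) (pvDC m) ++ pvEmitC n m

theorem pv_digit_cases (c : Char) (h : c.isDigit = true) :
    c = '0' ∨ c = '1' ∨ c = '2' ∨ c = '3' ∨ c = '4' ∨ c = '5' ∨ c = '6' ∨ c = '7' ∨ c = '8' ∨ c = '9' := by
  have h1 : 48 ≤ c.toNat ∧ c.toNat ≤ 57 := by
    simp [Char.isDigit] at h
    exact ⟨h.1, h.2⟩
  have hc : Char.ofNat c.toNat = c := Char.ofNat_toNat c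
  have h2 : c.toNat = 48 ∨ c.toNat = 49 ∨ c.toNat = 50 ∨ c.toNat = 51 ∨ c.toNat = 52 ∨ c.toNat = 53 ∨
      c.toNat = 54 ∨ c.toNat = 55 ∨ c.toNat = 56 ∨ c.toNat = 57 := by omega
  rcases h2 with h2|h2|h2|h2|h2|h2|h2|h2|h2|h2 <;> rw [← hc, h2] <;> simp

theorem pv_toNat_bounds (c : Char) (h : c.isDigit = true) : 48 ≤ c.toNat ∧ c.toNat ≤ 57 := by
  rcases pv_digit_cases c h with rfl|rfl|rfl|rfl|rfl|rfl|rfl|rfl|rfl|rfl <;> decide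

theorem pv_ofStr_digit (c : Char) (h : c.isDigit = true) :
    PySem.Int.ofStr? c.toString = some ((c.toNat : Int) - 48) := by
  rcases pv_digit_cases c h with rfl|rfl|rfl|rfl|rfl|rfl|rfl|rfl|rfl|rfl <;> decide

theorem pv_pvDC_toNat (k : Nat) (hk : k < 10) : (pvDC k).toNat = 48 + k := by
  interval_cases k <;> rfl

theorem pv_toStr_digit (k : Nat) (hk : k < 10) : (PySem.Int.toStr (k : Int)).toList = [pvDC k] := by
  interval_cases k <;> rfl

theorem pv_char_eq_iff (a b : Char) : a = b ↔ a.toNat = b.toNat := by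
  constructor
  · intro h; rw [h]
  · intro h; rw [← Char.ofNat_toNat a, h, Char.ofNat_toNat]

theorem pv_getD_set (l : List Int) (i k : Nat) (v : Int) (hi : i < l.length) :
    (l.set i v).getD k 0 = if i = k then v else l.getD k 0 := by
  by_cases hk : i = k
  · subst hk; simp [List.getD, hi]
  · simp [List.getD, List.getElem?_set_ne hk, hk]

theorem pv_flatten_rep {α : Type} (m : Nat) (a : α) : (List.replicate m [a]).flatten = List.replicate m a := by
  induction m with
  | zero => rfl
  | succ m ih => simp [List.replicate_succ, ih]

-- A's counting loop: counts bucket k accumulates the number of occurrences of digit k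
theorem pv_foldA (cs : List Char) (h : ∀ c ∈ cs, c.isDigit = true) :
    ∀ counts : List Int, counts.length = 10 →
    ∃ counts', cs.foldl pvCountStep (some counts) = some counts' ∧ counts'.length = 10 ∧
      ∀ k : Nat, k < 10 → counts'.getD k 0 = counts.getD k 0 + (cs.count (pvDC k) : Int) := by
  induction cs with
  | nil =>
    intro counts hl
    exact ⟨counts, rfl, hl, by simp⟩
  | cons c cs ih =>
    intro counts hl
    have hc : c.isDigit = true := h c (by simp)
    have hrest : ∀ x ∈ cs, x.isDigit = true := fun x hx => h x (by simp [hx])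
    have hb := pv_toNat_bounds c hc
    set dN : Nat := c.toNat - 48 with hdN
    have hd10 : dN < 10 := by omega
    have hcast : (c.toNat : Int) - 48 = ((dN : Nat) : Int) := by omega
    have hstep : pvCountStep (some counts) c
        = some (counts.set dN (counts.getD dN 0 + 1)) := by
      show ((PySem.Int.ofStr? c.toString).map fun d =>
        PySem.List.pySetD counts d (PySem.List.pyGetD counts d 0 + 1)) = _
      rw [pv_ofStr_digit c hc, hcast, Option.map_some,
        PySem.List.pySetD_natCast, PySem.List.pyGetD_natCast]
    obtain ⟨counts', hfold, hlen', hval⟩ :=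
      ih hrest (counts.set dN (counts.getD dN 0 + 1)) (by simp [hl])
    refine ⟨counts', by rw [List.foldl_cons, hstep, hfold], hlen', ?_⟩
    intro k hk
    have hDCk : (pvDC k).toNat = 48 + k := pv_pvDC_toNat k hk
    have hiff : (pvDC k = c) ↔ (k = dN) := by
      rw [pv_char_eq_iff, hDCk]; omega
    rw [hval k hk, pv_getD_set counts dN k _ (by omega)]
    by_cases hkd : k = dN
    · have hpc : pvDC k = c := hiff.mpr hkd
      subst hkd
      rw [if_pos rfl, List.count_cons]
      simp only [hpc, BEq.rfl, if_true]
      push_cast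
      omega
    · have hpc : ¬ (pvDC k = c) := fun hcontra => hkd (hiff.mp hcontra)
      rw [if_neg (fun hdd => hkd hdd.symm), List.count_cons,
        if_neg (by simp only [beq_iff_eq]; exact fun hh => hpc hh.symm)]
      push_cast
      omega

-- B's generator: on all-digit input, int(c) succeeds for every c
theorem pv_intList (cs : List Char) (h : ∀ c ∈ cs, c.isDigit = true) :
    pvIntList? cs = some (cs.map pvVal) := by
  induction cs with
  | nil => rfl
  | cons c cs ih =>
    have hc : c.isDigit = true := h c (by simp)
    have hrest : ∀ x ∈ cs, x.isDigit = true := fun x hx => h x (by simp [hx])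
    show ((PySem.Int.ofStr? c.toString).bind fun d => (pvIntList? cs).map (d :: ·)) = _
    rw [pv_ofStr_digit c hc, ih hrest, List.map_cons]
    rfl

theorem pv_emit_lt (n : Nat → Nat) (m : Nat) : ∀ x ∈ pvEmit n m, x < (m : Int) := by
  induction m with
  | zero => simp [pvEmit]
  | succ m ih =>
    intro x hx
    rcases List.mem_append.mp hx with hx | hx
    · have := List.eq_of_mem_replicate hx
      subst this; push_cast; omega
    · have := ih x hx; push_cast at this ⊢; omega

theorem pv_emit_pairwise (n : Nat → Nat) (m : Nat) :
    (pvEmit n m).Pairwise (fun a b : Int => b ≤ a) := by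
  induction m with
  | zero => simp [pvEmit]
  | succ m ih =>
    rw [pvEmit, List.pairwise_append]
    refine ⟨List.pairwise_replicate.mpr (Or.inr le_rfl), ih, ?_⟩
    intro a ha b hb
    have ha' := List.eq_of_mem_replicate ha
    have hb' := pv_emit_lt n m b hb
    subst ha'; omega

theorem pv_emit_count (n : Nat → Nat) (m : Nat) (v : Int) :
    (pvEmit n m).count v = if 0 ≤ v ∧ v < (m : Int) then n v.toNat else 0 := by
  induction m with
  | zero =>
    simp only [pvEmit, List.count_nil]
    split_ifs with hv
    · omega
    · rfl
  | succ m ih =>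
    rw [pvEmit, List.count_append, ih, List.count_replicate]
    by_cases hv : v = (m : Int)
    · subst hv
      rw [if_pos (by simp), if_neg (by omega), if_pos (by constructor <;> push_cast <;> omega)]
      simp
    · rw [if_neg (by simpa using Ne.symm hv)]
      simp only [zero_add]
      split_ifs with h1 h2 <;> first | rfl | (exfalso; omega)

theorem pv_map_count (cs : List Char) (h : ∀ c ∈ cs, c.isDigit = true) (v : Int) :
    (cs.map pvVal).count v = if 0 ≤ v ∧ v < 10 then cs.count (pvDC v.toNat) else 0 := by
  induction cs with
  | nil => simp
  | cons c cs ih =>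
    have hc : c.isDigit = true := h c (by simp)
    have hrest : ∀ x ∈ cs, x.isDigit = true := fun x hx => h x (by simp [hx])
    have hb := pv_toNat_bounds c hc
    rw [List.map_cons, List.count_cons, List.count_cons, ih hrest]
    by_cases hv : 0 ≤ v ∧ v < 10
    · have hDCk : (pvDC v.toNat).toNat = 48 + v.toNat := pv_pvDC_toNat v.toNat (by omega)
      have hiff : (pvVal c = v) ↔ (pvDC v.toNat = c) := by
        rw [pv_char_eq_iff, hDCk, pvVal]; omega
      simp only [hv, if_true]
      by_cases he : pvVal c = v
      · simp [he, hiff.mp he]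
      · have hne2 : ¬ (c = pvDC v.toNat) := fun hcontra => he (hiff.mpr hcontra.symm)
        simp [he, hne2]
    · have : ¬ (pvVal c = v) := by unfold pvVal; omega
      simp [hv, this]

theorem pv_perm (cs : List Char) (h : ∀ c ∈ cs, c.isDigit = true) :
    (cs.map pvVal).Perm (pvEmit (fun k => cs.count (pvDC k)) 10) := by
  rw [List.perm_iff_count]
  intro v
  rw [pv_map_count cs h v, pv_emit_count]
  norm_num

theorem pv_sorted_eq (cs : List Char) (h : ∀ c ∈ cs, c.isDigit = true) :
    PySem.List.sorted (cs.map pvVal) (fun x => x) true = pvEmit (fun k => cs.count (pvDC k)) 10 := by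
  refine List.Perm.eq_of_pairwise (le := fun a b : Int => b ≤ a) ?_ ?_ ?_ ?_
  · intro a b _ _ h1 h2; omega
  · exact PySem.List.sorted_pairwise_rev (cs.map pvVal) (fun x => x)
  · exact pv_emit_pairwise _ 10
  · exact ((PySem.List.sorted_perm (cs.map pvVal) (fun x => x) true)).trans (pv_perm cs h)

-- B's join over the canonical descending digit list, rendered as characters
theorem pv_emit_B (n : Nat → Nat) (m : Nat) (hm : m ≤ 10) :
    (pvEmit n m).flatMap (fun d => (PySem.Int.toStr d).toList) = pvEmitC n m := by
  induction m with
  | zero => rfl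
  | succ m ih =>
    rw [pvEmit, List.flatMap_append, ih (by omega), pvEmitC]
    congr 1
    rw [List.flatMap_def, List.map_replicate, pv_toStr_digit m (by omega), pv_flatten_rep]

-- A's emission loop over range(9, -1, -1), rewritten to the canonical block form
theorem pv_emit_A (counts : List Int) (hl : counts.length = 10) :
    (PySem.List.pyRange 9 (-1) (-1)).foldl
        (fun acc i => acc ++ (List.replicate (PySem.List.pyGetD counts i 0).toNat
          (PySem.Int.toStr i).toList).flatten) []
      = pvEmitC (fun k => (counts.getD k 0).toNat) 10 := by
  have hrange : PySem.List.pyRange 9 (-1) (-1) = [9,8,7,6,5,4,3,2,1,0] := by decide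
  have hget : ∀ k : Nat, k < 10 → PySem.List.pyGetD counts ((k : Nat) : Int) 0 = counts.getD k 0 :=
    fun k _ => PySem.List.pyGetD_natCast counts k 0
  rw [hrange]
  simp only [List.foldl_cons, List.foldl_nil, List.nil_append]
  have h9 := hget 9 (by omega); have h8 := hget 8 (by omega); have h7 := hget 7 (by omega)
  have h6 := hget 6 (by omega); have h5 := hget 5 (by omega); have h4 := hget 4 (by omega)
  have h3 := hget 3 (by omega); have h2 := hget 2 (by omega); have h1 := hget 1 (by omega)
  have h0 := hget 0 (by omega)
  push_cast at h9 h8 h7 h6 h5 h4 h3 h2 h1 h0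
  rw [h9, h8, h7, h6, h5, h4, h3, h2, h1, h0]
  simp only [pvEmitC]
  have e9 : (PySem.Int.toStr (9:Int)).toList = [pvDC 9] := by decide
  have e8 : (PySem.Int.toStr (8:Int)).toList = [pvDC 8] := by decide
  have e7 : (PySem.Int.toStr (7:Int)).toList = [pvDC 7] := by decide
  have e6 : (PySem.Int.toStr (6:Int)).toList = [pvDC 6] := by decide
  have e5 : (PySem.Int.toStr (5:Int)).toList = [pvDC 5] := by decide
  have e4 : (PySem.Int.toStr (4:Int)).toList = [pvDC 4] := by decide
  have e3 : (PySem.Int.toStr (3:Int)).toList = [pvDC 3] := by decide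
  have e2 : (PySem.Int.toStr (2:Int)).toList = [pvDC 2] := by decide
  have e1 : (PySem.Int.toStr (1:Int)).toList = [pvDC 1] := by decide
  have e0 : (PySem.Int.toStr (0:Int)).toList = [pvDC 0] := by decide
  rw [e9, e8, e7, e6, e5, e4, e3, e2, e1, e0]
  simp [pv_flatten_rep, List.append_assoc]

theorem pv_emitC_congr (n₁ n₂ : Nat → Nat) (m : Nat) (h : ∀ k < m, n₁ k = n₂ k) :
    pvEmitC n₁ m = pvEmitC n₂ m := by
  induction m with
  | zero => rfl
  | succ m ih =>
    rw [pvEmitC, pvEmitC, h m (by omega), ih (fun k hk => h k (by omega))]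

-- ===== VERDICT (by name: the statement is the Claim_ definition above) =====
theorem largest_palindromic_number_spec : Claim_equal_largest_palindromic_number := by
  intro S _ hpre
  unfold Spec_largest_palindromic_number
  have h : ∀ c ∈ S.toList, c.isDigit = true := by
    have := hpre
    unfold Pre_largest_palindromic_number at this
    exact fun c hc => List.all_eq_true.mp this c hc
  obtain ⟨counts', hfold, hlen', hval⟩ :=
    pv_foldA S.toList h (List.replicate 10 (0 : Int)) (by simp)
  unfold largest_palindromic_number largest_palindromic_number_alt
  rw [hfold, pv_intList S.toList h]
  simp only [pv_sorted_eq S.toList h, pv_emit_B _ 10 (by omega), pv_emit_A counts' hlen']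
  have hcounts : pvEmitC (fun k => (counts'.getD k 0).toNat) 10
      = pvEmitC (fun k => S.toList.count (pvDC k)) 10 := by
    apply pv_emitC_congr
    intro k hk
    have hrep : (List.replicate 10 (0:Int)).getD k 0 = 0 := by
      interval_cases k <;> rfl
    rw [hval k hk, hrep]
    simp
  rw [hcounts]
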